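-- pv_equiv track=rewrite | github.com/khawarzia/real-estate | ptm/functionality/views.py | stripspace
-- ===== SOURCE A (Python) =====
-- def stripspace(a):
--     b = ''
--     check = 1
--     for i in a:
--         if check == 1:
--             if i == ' ':
--                 continue
--             elif i == '\n':
--                 continue
--             else:
--                 check = 2
--         if check == 2:
--             b = b + i
--     return b
-- ===== SOURCE B (Python) =====
-- def stripspace(a):
--     idx = None
--     for j, c in enumerate(a):
--         if c != ' ' and c != '\n':
--             idx = j
--             break
--     return '' if idx is None else a[idx:]
-- ===== Notes on version B (the rewrite author's own statement) =====
-- stated objective: faster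
-- what changed: Replaces the stateful char-by-char accumulation (quadratic string concatenation) with a scan that finds the first non-stripped index and returns a single slice from there.
import Mathlib
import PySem

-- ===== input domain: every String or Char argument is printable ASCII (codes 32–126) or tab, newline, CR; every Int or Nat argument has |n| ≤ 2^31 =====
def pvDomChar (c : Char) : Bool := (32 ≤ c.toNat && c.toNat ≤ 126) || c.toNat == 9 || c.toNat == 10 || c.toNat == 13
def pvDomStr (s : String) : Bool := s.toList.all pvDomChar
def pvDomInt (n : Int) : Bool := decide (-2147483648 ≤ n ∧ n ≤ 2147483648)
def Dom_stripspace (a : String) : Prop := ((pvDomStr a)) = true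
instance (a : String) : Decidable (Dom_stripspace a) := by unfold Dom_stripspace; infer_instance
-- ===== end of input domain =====

-- B replaces A's stateful char-by-char accumulation with a boundary-find plus one slice (simpler).

-- ===== PORT A =====
-- state = (b, check), exactly A's loop: on check==1 skip ' ' and '\n', otherwise set check:=2;
-- then, if check==2, append the character.
def stripspaceStep (st : List Char × Int) (i : Char) : List Char × Int :=
  let check1 := st.2
  let check2 := if check1 == 1 then
                  (if i == ' ' then check1 else if i == '\n' then check1 else 2)
                else check1
  if (i == ' ' || i == '\n') && check1 == 1 then (st.1, check2)
  else if check2 == 2 then (st.1 ++ [i], check2) else (st.1, check2)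

def stripspace (a : String) : String :=
  String.mk (a.toList.foldl stripspaceStep ([], 1)).1

-- ===== PORT B =====
-- first index whose character is neither ' ' nor '\n' (the loop with break in Source B)
def firstIdx (l : List Char) : Option Nat :=
  match l with
  | [] => none
  | c :: cs => if c ≠ ' ' ∧ c ≠ '\n' then some 0 else (firstIdx cs).map (· + 1)

def stripspace_alt (a : String) : String :=
  match firstIdx a.toList with
  | none => ""
  | some j => String.mk (a.toList.drop j)   -- a[j:] on an in-range nonneg index

-- ===== PRECONDITION & SPEC =====
def Spec_stripspace (a : String) (out : String) : Prop := out = stripspace_alt a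
instance (a : String) (out : String) : Decidable (Spec_stripspace a out) := by unfold Spec_stripspace; infer_instance

-- ===== CLAIM (what is proved, stated in full; the proofs are below) =====
def Claim_equal_stripspace : Prop := ∀ (a : String), Dom_stripspace a → Spec_stripspace a (stripspace a)

-- ===== LEMMAS AND PROOFS =====

-- once check = 2, A's loop appends every remaining character
theorem foldl_check2 (l b : List Char) :
    l.foldl stripspaceStep (b, 2) = (b ++ l, 2) := by
  induction l generalizing b with
  | nil => simp
  | cons c cs ih =>
      simp [List.foldl, stripspaceStep, ih]

-- in the check = 1 state, A's loop computes: drop the leading run of ' '/'\n', append the rest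
theorem foldl_check1 (l b : List Char) :
    l.foldl stripspaceStep (b, 1) =
      (b ++ (match firstIdx l with
             | none => []
             | some j => l.drop j), 2 - (if firstIdx l = none then 1 else 0)) := by
  induction l generalizing b with
  | nil => simp [firstIdx]
  | cons c cs ih =>
      by_cases hc : c ≠ ' ' ∧ c ≠ '\n'
      · obtain ⟨h1, h2⟩ := hc
        simp [List.foldl, stripspaceStep, h1, h2, foldl_check2, firstIdx]
      · have hsp : c = ' ' ∨ c = '\n' := by
          by_cases h1 : c = ' '
          · exact Or.inl h1
          · right
            by_contra h2
            exact hc ⟨h1, h2⟩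
        have hfold : stripspaceStep (b, 1) c = (b, 1) := by
          rcases hsp with h | h <;> simp [stripspaceStep, h]
        have hfi : firstIdx (c :: cs) = (firstIdx cs).map (· + 1) := by
          simp [firstIdx, hc]
        rw [List.foldl_cons, hfold, ih, hfi]
        cases h : firstIdx cs <;> simp [h]

-- ===== VERDICT (by name: the statement is the Claim_ definition above) =====
theorem stripspace_spec : Claim_equal_stripspace := by
  intro a _
  unfold Spec_stripspace stripspace stripspace_alt
  rw [foldl_check1]
  cases h : firstIdx a.toList with
  | none => simp [h]; decide
  | some j => simp [h]
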